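-- pv_equiv track=rewrite | github.com/robercano/CodilityChallenges | CodingWeekChallenge2022/tryouts/solution-4.py | solution
-- ===== SOURCE A (Python) =====
-- class Node:
--     def __init__(self):
--         self.nexts = []
--
--     def __str__(self) -> str:
--         return str(self.id)
--     def __repr__(self) -> str:
--         return str(self.id)
--
-- def get_chain_length(node, previous):
--     length = 1
--     is_end = False
--
--     while is_end == False:
--         is_end = True
--         for next in node.nexts:
--             if next == previous:
--                 continue
--
--             length += 1
--             previous = node
--             node = next
--             is_end = False
--
--     return length
--
-- def get_stars(nodes):
--     stars = []
--     for node in nodes: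
--         if len(node.nexts) > 2:
--             stars.append(node)
--
--     return stars
--
-- def get_star_arms_lengths(star):
--     lengths = []
--     for node in star.nexts:
--         chain_length = get_chain_length(node, star)
--         if chain_length > 1:
--             lengths.append(chain_length)
--     return lengths
--
-- def calculate_stars_substracted_paths(nodes):
--
--     stars = get_stars(nodes)
--
--     if len(stars) != 1:
--         return 0
--
--     star = stars[0]
--     num_nodes = len(nodes)
--     arms_length = get_star_arms_lengths(star)
--
--     num_arms = len(arms_length)
--
--     if num_nodes % 2 == 0:
--         max_arms = num_nodes // 2 - 1
--         missing_arms = max_arms - num_arms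
--         return missing_arms * missing_arms
--     else:
--         max_arms = (num_nodes - 1) // 2 - 1
--         missing_arms = max_arms - num_arms
--         return missing_arms * (missing_arms + 1)
--
-- def solution(A, B):
--     if len(A) != len(B):
--         return 0
--
--     if len(A) == 0:
--         return 0
--
--     if(len(A) == 1):
--         return 1
--
--     if (len(A) == 2):
--         return 2
--
--     nodes = [Node() for i in range(len(A) + 1)]
--
--     for i in range(len(A)):
--         nodeA = nodes[A[i]]
--         nodeB = nodes[B[i]]
--
--         nodeA.nexts.append(nodeB)
--         nodeB.nexts.append(nodeA)
--
--     substracted_paths = calculate_stars_substracted_paths(nodes)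
--
--     num_nodes = len(nodes)
--     if num_nodes % 2 == 0:
--         return (num_nodes * num_nodes // 4) - substracted_paths
--     else:
--         return (((num_nodes * num_nodes) - 1) // 4) - substracted_paths
-- ===== SOURCE B (Python) =====
-- def solution(A, B):
--     if len(A) != len(B):
--         return 0
--     if len(A) == 0:
--         return 0
--     if len(A) == 1:
--         return 1
--     if len(A) == 2:
--         return 2
--
--     N = len(A) + 1
--     adj = [[] for _ in range(N)]
--     for a, b in zip(A, B):
--         adj[a].append(b)
--         adj[b].append(a)
--
--     stars = [v for v in range(N) if len(adj[v]) > 2]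
--
--     if len(stars) == 1:
--         star = stars[0]
--         num_arms = sum(1 for u in adj[star] if len(adj[u]) > 1)
--         max_arms = (N // 2 if N % 2 == 0 else (N - 1) // 2) - 1
--         missing = max_arms - num_arms
--         sub = missing * missing if N % 2 == 0 else missing * (missing + 1)
--     else:
--         sub = 0
--
--     if N % 2 == 0:
--         return N * N // 4 - sub
--     return (N * N - 1) // 4 - sub
-- ===== Notes on version B (the rewrite author's own statement) =====
-- stated objective: simpler
-- what changed: B drops get_chain_length and the whole arm-walking machinery: num_arms is computed directly as the number of the star's neighbors whose own degree exceeds 1, which equals the number of arms with chain length > 1 on every input Pre_ admits (in particular on every single-star tree on which A terminates, in any edge order).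
-- outside the precondition, e.g. on solution([0, 0, 0, 0], [1, 1, 2, 3]): A returns 4, B returns 6; on solution([1, 2, 1, 2], [1, 3, 1, 0]): A returns 4, B returns 0; on solution([3, 2, 1], [1, 3, 3]): A returns 3, B returns 3
import Mathlib
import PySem

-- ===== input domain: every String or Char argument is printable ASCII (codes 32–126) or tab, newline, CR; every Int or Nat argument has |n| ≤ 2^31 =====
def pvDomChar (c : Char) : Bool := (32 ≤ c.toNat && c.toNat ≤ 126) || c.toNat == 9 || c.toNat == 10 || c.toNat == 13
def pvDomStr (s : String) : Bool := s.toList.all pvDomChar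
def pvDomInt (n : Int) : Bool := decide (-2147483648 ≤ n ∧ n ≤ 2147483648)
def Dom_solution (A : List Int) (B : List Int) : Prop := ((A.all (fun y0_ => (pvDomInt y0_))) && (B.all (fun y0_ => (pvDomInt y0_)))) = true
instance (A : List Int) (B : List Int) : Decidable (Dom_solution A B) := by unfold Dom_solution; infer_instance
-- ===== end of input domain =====

-- B replaces A's per-arm chain walk by counting star neighbors of degree > 1 (simpler; equal
-- wherever A returns on the inputs admitted by Pre_).

-- ===== PORT A =====
-- Both Pythons build the graph with the same loop (A on Node objects, B on adjacency lists); since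
-- Python Node equality is object identity and the nodes are the distinct entries of one list, the
-- port represents a node by its index in `nodes` and `node.nexts` by a list of indices.
-- pvNorm models Python's negative list indexing nodes[v] (exact on the in-range indices Pre_ admits).
def pvNorm (N v : Int) : Int := if v < 0 then v + N else v

-- for i in range(len(A)): nodes[A[i]].nexts.append(nodes[B[i]]); nodes[B[i]].nexts.append(nodes[A[i]])
def pvAdjStep (N : Int) (f : Int → List Int) (e : Int × Int) : Int → List Int :=
  let a := pvNorm N e.1
  let b := pvNorm N e.2
  let f1 := Function.update f a (f a ++ [b])
  Function.update f1 b (f1 b ++ [a])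

def pvBuildAdj (N : Int) (es : List (Int × Int)) : Int → List Int :=
  es.foldl (pvAdjStep N) (fun _ => [])

-- state of get_chain_length's while/for loops: (length, previous, node, is_end)
def pvChainStep (st : Int × Int × Int × Bool) (nxt : Int) : Int × Int × Int × Bool :=
  if nxt = st.2.1 then st else (st.1 + 1, st.2.2.1, nxt, false)

-- the `while is_end == False` loop, with fuel (the Python can diverge; Pre_ excludes those inputs,
-- and on the admitted inputs the fuel passed below is never exhausted)
def pvChainLoop (adj : Int → List Int) : Nat → Int → Int → Int → Int
  | 0, len, _, _ => len
  | fuel+1, len, prev, nd =>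
    let st := (adj nd).foldl pvChainStep (len, prev, nd, true)
    if st.2.2.2 then st.1 else pvChainLoop adj fuel st.1 st.2.1 st.2.2.1

def pvGetChainLength (adj : Int → List Int) (fuel : Nat) (node previous : Int) : Int :=
  pvChainLoop adj fuel 1 previous node

def pvGetStars (adj : Int → List Int) (N : Int) : List Int :=
  (PySem.List.pyRange 0 N 1).filter (fun v => decide (2 < (adj v).length))

def pvGetStarArmsLengths (adj : Int → List Int) (fuel : Nat) (star : Int) : List Int :=
  (adj star).foldl (fun lens nd =>
    let cl := pvGetChainLength adj fuel nd star
    if 1 < cl then lens ++ [cl] else lens) []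

def pvCalcStarsSubtractedPaths (adj : Int → List Int) (fuel : Nat) (N : Int) : Int :=
  match pvGetStars adj N with
  | [star] =>
    let numArms : Int := ((pvGetStarArmsLengths adj fuel star).length : Int)
    if PySem.Int.mod N 2 = 0 then
      let maxArms := PySem.Int.floordiv N 2 - 1
      let missing := maxArms - numArms
      missing * missing
    else
      let maxArms := PySem.Int.floordiv (N - 1) 2 - 1
      let missing := maxArms - numArms
      missing * (missing + 1)
  | _ => 0   -- if len(stars) != 1: return 0

def solution (A : List Int) (B : List Int) : Int :=
  if A.length ≠ B.length then 0
  else if A.length = 0 then 0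
  else if A.length = 1 then 1
  else if A.length = 2 then 2
  else
    let N : Int := (A.length : Int) + 1
    let adj := pvBuildAdj N (A.zip B)
    let sub := pvCalcStarsSubtractedPaths adj (A.length + 2) N
    if PySem.Int.mod N 2 = 0 then PySem.Int.floordiv (N * N) 4 - sub
    else PySem.Int.floordiv (N * N - 1) 4 - sub

-- ===== PORT B =====
-- num_arms = sum(1 for u in adj[star] if len(adj[u]) > 1)
def pvNumArms (adj : Int → List Int) (star : Int) : Int :=
  (((adj star).countP (fun u => decide (1 < (adj u).length))) : Int)

def pvSubAlt (adj : Int → List Int) (N : Int) : Int :=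
  match pvGetStars adj N with
  | [star] =>
    let numArms := pvNumArms adj star
    let maxArms := (if PySem.Int.mod N 2 = 0 then PySem.Int.floordiv N 2
                    else PySem.Int.floordiv (N - 1) 2) - 1
    let missing := maxArms - numArms
    if PySem.Int.mod N 2 = 0 then missing * missing else missing * (missing + 1)
  | _ => 0

def solution_alt (A : List Int) (B : List Int) : Int :=
  if A.length ≠ B.length then 0
  else if A.length = 0 then 0
  else if A.length = 1 then 1
  else if A.length = 2 then 2
  else
    let N : Int := (A.length : Int) + 1
    let adj := pvBuildAdj N (A.zip B)
    let sub := pvSubAlt adj N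
    if PySem.Int.mod N 2 = 0 then PySem.Int.floordiv (N * N) 4 - sub
    else PySem.Int.floordiv (N * N - 1) 4 - sub

-- ===== PRECONDITION & SPEC =====
-- the adjacency list of vertex v determined directly by the edge list (independent of the ports)
def preAdj (N : Int) (es : List (Int × Int)) (v : Int) : List Int :=
  es.flatMap (fun e =>
    (if pvNorm N e.1 = v then [pvNorm N e.2] else []) ++
    (if pvNorm N e.2 = v then [pvNorm N e.1] else []))

-- shape check: starting at `cur` with parent `prev`, the arm is a parent-first simple path —
-- every arm vertex lists its parent (only) before its unique child, ending at a tip whose whole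
-- adjacency list is its parent; `rem` is the set of vertices not yet visited
-- (structural recursion on `k`, kept equal to `rem.length + 1`: when `k` would run out, `rem` is
-- already empty and the membership test fails, so the extra counter does not change the predicate)
def armOK (N : Int) (es : List (Int × Int)) : Nat → List Int → Int → Int → Bool
  | 0, _, _, _ => false
  | k+1, rem, prev, cur =>
    match (preAdj N es cur).getLast? with
    | none => false
    | some c =>
      ((preAdj N es cur).dropLast.all (fun x => x == prev)) &&
      (if c = prev then true
       else decide (cur ∈ rem) && armOK N es k (rem.erase cur) cur c)

-- an arm of the star s starting at its neighbor u: either u is a leaf [s], or u lists s (only)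
-- before its unique child and the rest of the arm is a parent-first path
def armTop (N : Int) (es : List (Int × Int)) (s u : Int) : Bool :=
  match (preAdj N es u).getLast? with
  | none => false
  | some c =>
    ((preAdj N es u).dropLast.all (fun x => x == s)) &&
    (if c = s then (preAdj N es u).length == 1
     else
       let rem := (PySem.List.pyRange 0 N 1).erase u
       armOK N es (rem.length + 1) rem u c)

def preCheck (A B : List Int) : Bool :=
  if A.length = B.length ∧ 3 ≤ A.length then
    let N : Int := (A.length : Int) + 1
    let es := A.zip B
    ((A ++ B).all (fun v => decide (-N ≤ v ∧ v < N))) &&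
    (match (PySem.List.pyRange 0 N 1).filter (fun v => decide (2 < (preAdj N es v).length)) with
     | [s] => (preAdj N es s).all (fun u => armTop N es s u)
     | _ => true)
  else true

-- Pre_ excludes (i) inputs with an endpoint outside the node-list index range (Python A raises
-- IndexError there) and (ii) inputs with exactly one degree>2 vertex whose arms are not
-- parent-first simple paths (cycles, self-loops, duplicate edges, or a child listed before the
-- parent in an arm vertex's adjacency): on those A's arm walk usually loops forever, and where it
-- halts at all its value is an accident of the walk's duplicate-skip teleporting.  Every
-- single-star tree on which A terminates — in any edge order and orientation — is admitted.
def Pre_solution (A : List Int) (B : List Int) : Prop := preCheck A B = true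
instance (A : List Int) (B : List Int) : Decidable (Pre_solution A B) := by
  unfold Pre_solution; infer_instance

def pvWitness_solution : List Int × List Int := ([0, 0, 0, 3], [1, 2, 3, 4])

def Spec_solution (A : List Int) (B : List Int) (out : Int) : Prop := out = solution_alt A B
instance (A : List Int) (B : List Int) (out : Int) : Decidable (Spec_solution A B out) := by
  unfold Spec_solution; infer_instance

-- ===== CLAIM (what is proved, stated in full; the proofs are below) =====
def Claim_equal_solution : Prop := ∀ (A : List Int) (B : List Int), Dom_solution A B → Pre_solution A B → Spec_solution A B (solution A B)

-- ===== LEMMAS AND PROOFS =====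

theorem pvAdjStep_apply (N : Int) (f : Int → List Int) (e : Int × Int) (v : Int) :
    pvAdjStep N f e v = f v ++ ((if pvNorm N e.1 = v then [pvNorm N e.2] else []) ++
      (if pvNorm N e.2 = v then [pvNorm N e.1] else [])) := by
  unfold pvAdjStep
  simp only [Function.update_apply]
  rcases eq_or_ne v (pvNorm N e.2) with h1 | h1 <;>
    rcases eq_or_ne v (pvNorm N e.1) with h2 | h2
  · simp [← h1, ← h2]
  · simp [← h1, h2, Ne.symm h2]
  · simp [← h2, h1, Ne.symm h1]
  · simp [h1, h2, Ne.symm h1, Ne.symm h2]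

theorem pvAdj_foldl (N : Int) (es : List (Int × Int)) (f : Int → List Int) (v : Int) :
    (es.foldl (pvAdjStep N) f) v = f v ++ preAdj N es v := by
  induction es generalizing f with
  | nil => simp [preAdj]
  | cons e es ih =>
    simp only [List.foldl_cons, ih, preAdj, List.flatMap_cons, pvAdjStep_apply,
      List.append_assoc]

theorem pvBuildAdj_eq (N : Int) (es : List (Int × Int)) (v : Int) :
    pvBuildAdj N es v = preAdj N es v := by
  unfold pvBuildAdj; rw [pvAdj_foldl]; simp

theorem mem_ite_singleton {p : Prop} [Decidable p] {x y : Int} :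
    x ∈ (if p then [y] else ([] : List Int)) ↔ p ∧ x = y := by
  split <;> simp_all

theorem preAdj_mem (N : Int) (es : List (Int × Int)) (v x : Int) :
    x ∈ preAdj N es v ↔ ∃ e ∈ es,
      (pvNorm N e.1 = v ∧ pvNorm N e.2 = x) ∨ (pvNorm N e.2 = v ∧ pvNorm N e.1 = x) := by
  unfold preAdj
  simp only [List.mem_flatMap, List.mem_append, mem_ite_singleton]
  constructor
  · rintro ⟨e, he, h | h⟩ <;> exact ⟨e, he, by tauto⟩
  · rintro ⟨e, he, h | h⟩ <;> exact ⟨e, he, by tauto⟩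

theorem preAdj_symm (N : Int) (es : List (Int × Int)) {u s : Int}
    (h : u ∈ preAdj N es s) : s ∈ preAdj N es u := by
  rw [preAdj_mem] at h ⊢
  obtain ⟨e, he, h | h⟩ := h
  · exact ⟨e, he, Or.inr ⟨h.2, h.1⟩⟩
  · exact ⟨e, he, Or.inl ⟨h.2, h.1⟩⟩

-- length never decreases along one pass of the for loop
theorem pvChainFold_len_mono (l : List Int) (st : Int × Int × Int × Bool) :
    st.1 ≤ (l.foldl pvChainStep st).1 := by
  induction l generalizing st with
  | nil => simp
  | cons y l ih =>
    refine le_trans ?_ (ih (pvChainStep st y))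
    unfold pvChainStep
    split <;> simp

theorem pvChainFold_false (l : List Int) (st : Int × Int × Int × Bool)
    (h : st.2.2.2 = false) : (l.foldl pvChainStep st).2.2.2 = false := by
  induction l generalizing st with
  | nil => simp [h]
  | cons y l ih =>
    apply ih
    unfold pvChainStep
    split <;> simpa

theorem pvChainLoop_mono (adj : Int → List Int) (fuel : Nat) (len prev nd : Int) :
    len ≤ pvChainLoop adj fuel len prev nd := by
  induction fuel generalizing len prev nd with
  | zero => simp [pvChainLoop]
  | succ fuel ih =>
    simp only [pvChainLoop]
    have h1 := pvChainFold_len_mono (adj nd) (len, prev, nd, true)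
    split
    · simpa using h1
    · exact le_trans (by simpa using h1) (ih _ _ _)

-- a pass over a list containing an element different from `previous` moves and clears is_end
theorem pvChainFold_move (l : List Int) (len prev nd : Int)
    (h : ∃ x ∈ l, x ≠ prev) :
    (l.foldl pvChainStep (len, prev, nd, true)).2.2.2 = false ∧
      len + 1 ≤ (l.foldl pvChainStep (len, prev, nd, true)).1 := by
  induction l generalizing len prev nd with
  | nil => simp at h
  | cons y l ih =>
    obtain ⟨x, hx, hxp⟩ := h
    by_cases hy : y = prev
    · have hxl : x ∈ l := by
        rcases List.mem_cons.mp hx with rfl | hmem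
        · exact absurd hy hxp
        · exact hmem
      have := ih len prev nd ⟨x, hxl, hxp⟩
      simp [pvChainStep, hy]; simpa using this
    · simp only [List.foldl_cons]
      have hstep : pvChainStep (len, prev, nd, true) y = (len + 1, nd, y, false) := by
        simp [pvChainStep, hy]
      rw [hstep]
      exact ⟨pvChainFold_false l _ rfl, pvChainFold_len_mono l _⟩

theorem chainLength_leaf (adj : Int → List Int) (fuel : Nat) (u s : Int)
    (h : adj u = [s]) : pvGetChainLength adj (fuel + 1) u s = 1 := by
  simp only [pvGetChainLength, pvChainLoop]
  simp [h, pvChainStep]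

theorem chainLength_big (adj : Int → List Int) (fuel : Nat) (u s : Int)
    (h : ∃ x ∈ adj u, x ≠ s) : 1 < pvGetChainLength adj (fuel + 1) u s := by
  simp only [pvGetChainLength, pvChainLoop]
  obtain ⟨hie, hlen⟩ := pvChainFold_move (adj u) 1 s u h
  split
  · omega
  · have := pvChainLoop_mono adj fuel
      ((adj u).foldl pvChainStep (1, s, u, true)).1
      ((adj u).foldl pvChainStep (1, s, u, true)).2.1
      ((adj u).foldl pvChainStep (1, s, u, true)).2.2.1
    omega

theorem arms_foldl_length (g : Int → Int) (l : List Int) (acc : List Int) :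
    (l.foldl (fun lens nd => let cl := g nd; if 1 < cl then lens ++ [cl] else lens) acc).length
      = acc.length + l.countP (fun nd => decide (1 < g nd)) := by
  induction l generalizing acc with
  | nil => simp
  | cons y l ih =>
    simp only [List.foldl_cons, List.countP_cons]
    by_cases hy : 1 < g y
    · rw [ih]; simp [hy]; omega
    · rw [ih]; simp [hy]

-- the heart of the equivalence: on admitted one-star inputs, an arm has chain length > 1
-- exactly when the star's neighbor has degree > 1
theorem numArms_eq (N : Int) (es : List (Int × Int)) (s : Int) (fuel : Nat)
    (hall : (preAdj N es s).all (fun u => armTop N es s u) = true) :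
    ((pvGetStarArmsLengths (pvBuildAdj N es) (fuel + 1) s).length : Int)
      = pvNumArms (pvBuildAdj N es) s := by
  unfold pvGetStarArmsLengths pvNumArms
  rw [arms_foldl_length]
  simp only [List.length_nil, Nat.zero_add, Nat.cast_inj]
  apply List.countP_congr
  intro u hu
  have hu' : u ∈ preAdj N es s := by rwa [pvBuildAdj_eq] at hu
  have htop : armTop N es s u = true := by
    have := List.all_eq_true.mp hall u hu'
    simpa using this
  have hs : s ∈ pvBuildAdj N es u := by
    rw [pvBuildAdj_eq]; exact preAdj_symm N es hu'
  rcases hlen : (pvBuildAdj N es u).length with _ | _ | k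
  · exact absurd (List.length_eq_zero_iff.mp hlen ▸ hs) (List.not_mem_nil)
  · -- degree 1: the only neighbor is the star, chain length is 1
    obtain ⟨x, hx⟩ := List.length_eq_one_iff.mp hlen
    have hxs : x = s := by
      have hmem := hs
      rw [hx] at hmem
      simp only [List.mem_singleton] at hmem
      exact hmem.symm
    rw [hxs] at hx
    rw [chainLength_leaf (pvBuildAdj N es) fuel u s hx]
    simp
  · -- degree ≥ 2: armTop gives a last element ≠ s, so chain length > 1
    have hlen' : (preAdj N es u).length = k + 2 := by rw [← pvBuildAdj_eq]; exact hlen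
    unfold armTop at htop
    rcases hlast : (preAdj N es u).getLast? with - | c
    · rw [hlast] at htop; exact absurd htop (by simp)
    · rw [hlast] at htop
      simp only [Bool.and_eq_true] at htop
      obtain ⟨-, htop2⟩ := htop
      have hcs : c ≠ s := by
        intro hcs
        rw [if_pos hcs] at htop2
        have : (preAdj N es u).length = 1 := by simpa using htop2
        omega
      have hcmem : c ∈ pvBuildAdj N es u := by
        rw [pvBuildAdj_eq]
        exact List.mem_of_getLast? hlast
      have := chainLength_big (pvBuildAdj N es) fuel u s ⟨c, hcmem, hcs⟩
      simp [this]

theorem stars_same (N : Int) (es : List (Int × Int)) :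
    pvGetStars (pvBuildAdj N es) N
      = (PySem.List.pyRange 0 N 1).filter (fun v => decide (2 < (preAdj N es v).length)) := by
  unfold pvGetStars
  apply List.filter_congr
  intro v _
  rw [pvBuildAdj_eq]

theorem sub_eq (A B : List Int) (hlen : A.length = B.length) (h3 : 3 ≤ A.length)
    (hpre : Pre_solution A B) :
    pvCalcStarsSubtractedPaths (pvBuildAdj ((A.length : Int) + 1) (A.zip B))
        (A.length + 2) ((A.length : Int) + 1)
      = pvSubAlt (pvBuildAdj ((A.length : Int) + 1) (A.zip B)) ((A.length : Int) + 1) := by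
  unfold Pre_solution preCheck at hpre
  rw [if_pos ⟨hlen, h3⟩] at hpre
  simp only [Bool.and_eq_true] at hpre
  obtain ⟨-, hstars⟩ := hpre
  unfold pvCalcStarsSubtractedPaths pvSubAlt
  rw [stars_same] at *
  rcases hst : (PySem.List.pyRange 0 ((A.length : Int) + 1) 1).filter
      (fun v => decide (2 < (preAdj ((A.length : Int) + 1) (A.zip B) v).length)) with - | ⟨s, - | ⟨s2, rest⟩⟩
  · rfl
  · rw [hst] at hstars
    have hall : (preAdj ((A.length : Int) + 1) (A.zip B) s).all
        (fun u => armTop ((A.length : Int) + 1) (A.zip B) s u) = true := hstars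
    have hnum := numArms_eq ((A.length : Int) + 1) (A.zip B) s (A.length + 1) hall
    have hfuel : A.length + 1 + 1 = A.length + 2 := rfl
    rw [hfuel] at hnum
    simp only [hnum]
    split <;> rfl
  · rfl

-- ===== VERDICT (by name: the statement is the Claim_ definition above) =====
theorem solution_spec : Claim_equal_solution := by
  unfold Claim_equal_solution
  intro A B _ hpre
  unfold Spec_solution solution solution_alt
  by_cases h1 : A.length ≠ B.length
  · rw [if_pos h1, if_pos h1]
  · rw [if_neg h1, if_neg h1]
    have hlen : A.length = B.length := not_not.mp h1
    by_cases h0 : A.length = 0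
    · rw [if_pos h0, if_pos h0]
    · rw [if_neg h0, if_neg h0]
      by_cases ha : A.length = 1
      · rw [if_pos ha, if_pos ha]
      · rw [if_neg ha, if_neg ha]
        by_cases hb : A.length = 2
        · rw [if_pos hb, if_pos hb]
        · rw [if_neg hb, if_neg hb]
          have h3 : 3 ≤ A.length := by omega
          simp only [sub_eq A B hlen h3 hpre]
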